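-- pv_equiv track=rewrite | github.com/chaojie/ComfyUI-KJNodes | nodes/nodes.py | interpolate_coordinates
-- ===== SOURCE A (Python) =====
-- def interpolate_coordinates(coordinates_dict, batch_size):
--     sorted_coords = sorted(coordinates_dict.items())
--     interpolated = {}
--
--     for i, ((index1, (x1, y1)), (index2, (x2, y2))) in enumerate(zip(sorted_coords, sorted_coords[1:])):
--         distance = index2 - index1
--         x_step = (x2 - x1) / distance
--         y_step = (y2 - y1) / distance
--
--         for j in range(distance):
--             interpolated_x = round(x1 + j * x_step)
--             interpolated_y = round(y1 + j * y_step)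
--             interpolated[index1 + j] = (interpolated_x, interpolated_y)
--     interpolated[sorted_coords[-1][0]] = sorted_coords[-1][1]
--
--     # Ensure we have coordinates for all indices in the batch
--     last_index, last_coords = sorted_coords[-1]
--     for i in range(last_index + 1, batch_size):
--         interpolated[i] = last_coords
--
--     return interpolated
-- ===== SOURCE B (Python) =====
-- def _segment(idxs, i, lo, hi):
--     # rightmost position p in [lo, hi] with idxs[p] <= i (idxs strictly increasing)
--     while lo < hi:
--         mid = (lo + hi + 1) // 2
--         if idxs[mid] <= i:
--             lo = mid
--         else:
--             hi = mid - 1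
--     return lo
--
--
-- def interpolate_coordinates(coordinates_dict, batch_size):
--     items = sorted(coordinates_dict.items())
--     idxs = [k for k, _ in items]
--     first = idxs[0]
--     last_index, last_coords = items[-1]
--     n = len(items)
--     out = {}
--     for i in range(first, last_index):
--         seg = _segment(idxs, i, 0, n - 1)
--         i1, (x1, y1) = items[seg]
--         i2, (x2, y2) = items[seg + 1]
--         d = i2 - i1
--         out[i] = (round(x1 + (i - i1) * ((x2 - x1) / d)),
--                   round(y1 + (i - i1) * ((y2 - y1) / d)))
--     out[last_index] = last_coords
--     for i in range(last_index + 1, batch_size):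
--         out[i] = last_coords
--     return out
-- ===== Notes on version B (the rewrite author's own statement) =====
-- stated objective: alternative
-- what changed: Replaces A's segment-driven nested loops (per keyframe pair, per offset) with a single index-driven pass over the output range that locates the enclosing keyframe segment by hand-rolled binary search on the sorted index array.
import Mathlib
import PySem

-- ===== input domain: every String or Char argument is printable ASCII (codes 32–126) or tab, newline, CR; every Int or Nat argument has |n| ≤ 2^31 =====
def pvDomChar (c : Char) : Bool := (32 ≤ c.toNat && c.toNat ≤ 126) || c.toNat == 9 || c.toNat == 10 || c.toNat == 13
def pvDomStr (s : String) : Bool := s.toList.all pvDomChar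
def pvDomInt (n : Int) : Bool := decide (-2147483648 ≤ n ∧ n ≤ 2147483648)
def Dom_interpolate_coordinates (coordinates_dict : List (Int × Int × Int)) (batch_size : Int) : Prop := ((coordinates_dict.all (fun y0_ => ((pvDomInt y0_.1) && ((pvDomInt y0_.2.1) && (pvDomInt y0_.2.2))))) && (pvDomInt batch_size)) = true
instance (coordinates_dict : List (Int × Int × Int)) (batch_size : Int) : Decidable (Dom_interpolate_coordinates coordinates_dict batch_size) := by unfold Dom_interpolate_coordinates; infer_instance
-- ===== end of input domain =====

-- B replaces A's per-keyframe-segment nested loops with one index-driven pass that finds the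
-- enclosing segment by binary search; return values only (neither version mutates its input).

-- ---- shared helpers: exact integer emulation of the CPython binary64 float pipeline -------------
-- Both Pythons compute round(x0 + j*(dx/d)) with IEEE-754 double arithmetic.  The helpers below
-- port that pipeline by hand, step for step, as correctly-rounded (round-half-even) operations on
-- dyadic rationals; this is exact on the |int| ≤ 2^31 domain (no overflow or subnormal is
-- reachable there), and is checked against CPython by the differential test.

-- round-half-even of p/q (q > 0): Python round() on an exactly-represented quotient
def pvRndHE (p q : Int) : Int :=
  let q0 := PySem.Int.floordiv p q
  let r2 := 2 * (p - q0 * q)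
  if r2 < q then q0 else if q < r2 then q0 + 1
  else if PySem.Int.mod q0 2 = 0 then q0 else q0 + 1

-- correctly rounded binary64 value of p/q (q > 0) as a dyadic (m, s): value = m / 2^s
def pvFl (p q : Int) : Int × Int :=
  if p = 0 then (0, 0) else
    let a := p.natAbs
    let b := q.toNat
    let e0 : Int := (Nat.log2 a : Int) - (Nat.log2 b : Int)
    let ge : Bool := if 0 ≤ e0 then decide (b * 2 ^ e0.toNat ≤ a) else decide (b ≤ a * 2 ^ (-e0).toNat)
    let e : Int := if ge then e0 else e0 - 1
    let s : Int := 52 - e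
    if 0 ≤ s then (pvRndHE (p * 2 ^ s.toNat) q, s)
    else (pvRndHE p (q * 2 ^ (-s).toNat) * 2 ^ (-s).toNat, 0)

-- round(x0 + j*(dx/d)) computed exactly as CPython computes it with doubles (d > 0)
def pvInterp (x0 dx d j : Int) : Int :=
  let st := pvFl dx d                                      -- x_step = dx / d
  let t := pvFl (j * st.1) (2 ^ st.2.toNat)                -- j * x_step
  let v := pvFl (x0 * 2 ^ t.2.toNat + t.1) (2 ^ t.2.toNat) -- x0 + j * x_step
  pvRndHE v.1 (2 ^ v.2.toNat)                              -- round(...)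

-- sorted(coordinates_dict.items()): the argument is a Python dict (unique keys, a later duplicate
-- overwrites in place), then items() sorted; keys are distinct, so Python's tuple sort is the
-- (stable) sort by key.
def pvSortedItems (coordinates_dict : List (Int × Int × Int)) : List (Int × Int × Int) :=
  PySem.List.sorted
    (PySem.Dict.items
      (coordinates_dict.foldl (fun d t => PySem.Dict.insert d t.1 t.2) PySem.Dict.empty))
    (fun p => p.1)

-- ===== PORT A =====
def interpolate_coordinates (coordinates_dict : List (Int × Int × Int)) (batch_size : Int) : List (Int × Int × Int) :=
  let sorted_coords := pvSortedItems coordinates_dict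
  let interpolated : PySem.Dict Int (Int × Int) :=
    (PySem.List.enumerate (sorted_coords.zip (PySem.List.slice sorted_coords (some 1) none)) 0).foldl
      (fun acc ip =>   -- the enumerate index ip.1 is unused in the Python body
        let index1 := ip.2.1.1; let x1 := ip.2.1.2.1; let y1 := ip.2.1.2.2
        let index2 := ip.2.2.1; let x2 := ip.2.2.2.1; let y2 := ip.2.2.2.2
        let distance := index2 - index1
        (PySem.List.pyRange 0 distance 1).foldl
          (fun acc2 j =>
            PySem.Dict.insert acc2 (index1 + j)
              (pvInterp x1 (x2 - x1) distance j, pvInterp y1 (y2 - y1) distance j))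
          acc)
      PySem.Dict.empty
  match PySem.List.pyGet? sorted_coords (-1) with
  | none => []   -- sorted_coords[-1] raises IndexError on an empty dict; excluded by Pre_
  | some lastP =>
    let d2 := PySem.Dict.insert interpolated lastP.1 lastP.2
    let d3 := (PySem.List.pyRange (lastP.1 + 1) batch_size 1).foldl
      (fun acc i => PySem.Dict.insert acc i lastP.2) d2
    PySem.Dict.items d3

-- ===== PORT B =====
-- _segment(idxs, i, lo, hi): rightmost p in [lo, hi] with idxs[p] <= i (idxs strictly increasing);
-- the while loop becomes well-founded recursion on hi - lo.  idxs[mid] is always in range when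
-- called from interpolate_coordinates_alt on a nonempty dict, where pyGetD is exact.
def pvSeg (idxs : List Int) (i : Int) (lo hi : Nat) : Nat :=
  if lo < hi then
    let mid := (lo + hi + 1) / 2
    if PySem.List.pyGetD idxs (mid : Int) 0 ≤ i then pvSeg idxs i mid hi
    else pvSeg idxs i lo (mid - 1)
  else lo
termination_by hi - lo
decreasing_by all_goals omega

-- the loop body's value; items/idxs/n are Source B's loop-invariant locals, passed unchanged
def pvBval (items : List (Int × Int × Int)) (idxs : List Int) (n : Nat) (i : Int) : Int × Int :=
  let seg := pvSeg idxs i 0 (n - 1)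
  let p1 := PySem.List.pyGetD items (seg : Int) (0, (0, 0))
  let p2 := PySem.List.pyGetD items ((seg : Int) + 1) (0, (0, 0))
  let d := p2.1 - p1.1
  (pvInterp p1.2.1 (p2.2.1 - p1.2.1) d (i - p1.1),
   pvInterp p1.2.2 (p2.2.2 - p1.2.2) d (i - p1.1))

def interpolate_coordinates_alt (coordinates_dict : List (Int × Int × Int)) (batch_size : Int) : List (Int × Int × Int) :=
  let items := pvSortedItems coordinates_dict
  let idxs := items.map (fun p => p.1)
  match PySem.List.pyGet? idxs 0, PySem.List.pyGet? items (-1) with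
  | some first, some lastP =>
    let n := items.length
    let out : PySem.Dict Int (Int × Int) :=
      (PySem.List.pyRange first lastP.1 1).foldl
        (fun acc i => PySem.Dict.insert acc i (pvBval items idxs n i))
        PySem.Dict.empty
    let d2 := PySem.Dict.insert out lastP.1 lastP.2
    let d3 := (PySem.List.pyRange (lastP.1 + 1) batch_size 1).foldl
      (fun acc i => PySem.Dict.insert acc i lastP.2) d2
    PySem.Dict.items d3
  | _, _ => []   -- idxs[0] raises IndexError on an empty dict; excluded by Pre_

-- ===== PRECONDITION & SPEC =====
-- Both Pythons raise IndexError on an empty coordinates_dict; nothing else raises.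
def Pre_interpolate_coordinates (coordinates_dict : List (Int × Int × Int)) (batch_size : Int) : Prop :=
  coordinates_dict ≠ []
instance (coordinates_dict : List (Int × Int × Int)) (batch_size : Int) : Decidable (Pre_interpolate_coordinates coordinates_dict batch_size) := by unfold Pre_interpolate_coordinates; infer_instance

def pvWitness_interpolate_coordinates : (List (Int × Int × Int)) × Int := ([(0, 0, 0), (2, 10, -4)], 5)

def Spec_interpolate_coordinates (coordinates_dict : List (Int × Int × Int)) (batch_size : Int) (out : List (Int × Int × Int)) : Prop := out = interpolate_coordinates_alt coordinates_dict batch_size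
instance (coordinates_dict : List (Int × Int × Int)) (batch_size : Int) (out : List (Int × Int × Int)) : Decidable (Spec_interpolate_coordinates coordinates_dict batch_size out) := by unfold Spec_interpolate_coordinates; infer_instance

-- ===== CLAIM (what is proved, stated in full; the proofs are below) =====
def Claim_equal_interpolate_coordinates : Prop := ∀ (coordinates_dict : List (Int × Int × Int)) (batch_size : Int), Dom_interpolate_coordinates coordinates_dict batch_size → Pre_interpolate_coordinates coordinates_dict batch_size → Spec_interpolate_coordinates coordinates_dict batch_size (interpolate_coordinates coordinates_dict batch_size)

-- ===== LEMMAS AND PROOFS =====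

-- the common per-index value of a segment (p1, p2)
def pvVal (p1 p2 : Int × Int × Int) (i : Int) : Int × Int :=
  (pvInterp p1.2.1 (p2.2.1 - p1.2.1) (p2.1 - p1.1) (i - p1.1),
   pvInterp p1.2.2 (p2.2.2 - p1.2.2) (p2.1 - p1.1) (i - p1.1))

-- A's interior insertions as one flat list
def pvLA (l : List (Int × Int × Int)) : List (Int × (Int × Int)) :=
  (l.zip l.tail).flatMap
    (fun pr => (PySem.List.pyRange pr.1.1 pr.2.1 1).map (fun i => (i, pvVal pr.1 pr.2 i)))

lemma pvSortedItems_pairwise (cd : List (Int × Int × Int)) :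
    (pvSortedItems cd).Pairwise (fun a b => a.1 < b.1) := by
  have hnodup : ((pvSortedItems cd).map (fun p => p.1)).Nodup := by
    have h1 : ((cd.foldl (fun d t => PySem.Dict.insert d t.1 t.2) PySem.Dict.empty).keys).Nodup :=
      PySem.Dict.nodup_keys_foldl_insert_key cd (fun t => t.1) (fun _ t => t.2) _ PySem.Dict.nodup_keys_empty
    have hperm : (pvSortedItems cd).Perm (PySem.Dict.items _) := PySem.List.sorted_perm _ _ _
    exact (hperm.map (fun p => p.1)).nodup_iff.mpr (by simpa [PySem.Dict.keys] using h1)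
  have hle : (pvSortedItems cd).Pairwise (fun a b => a.1 ≤ b.1) :=
    PySem.List.sorted_pairwise _ _
  have hne : (pvSortedItems cd).Pairwise (fun a b => a.1 ≠ b.1) := by
    simpa [List.Nodup, List.pairwise_map] using hnodup
  exact (hle.and hne).imp (fun h => lt_of_le_of_ne h.1 h.2)

lemma pvSortedItems_ne_nil (cd : List (Int × Int × Int)) (h : cd ≠ []) :
    pvSortedItems cd ≠ [] := by
  intro hnil
  have hitems := (PySem.List.sorted_eq_nil_iff _ _ _).mp hnil
  have hk := PySem.Dict.keys_foldl_insert_key cd (fun t => t.1) (fun _ t => t.2) PySem.Dict.empty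
  cases cd with
  | nil => exact h rfl
  | cons t r =>
    have hm : t.1 ∈ (((t :: r).foldl (fun d t => PySem.Dict.insert d t.1 t.2) PySem.Dict.empty).keys) := by
      rw [hk, PySem.Set.mem_update]
      simp
    rw [PySem.Dict.keys, hitems] at hm
    simp at hm

-- xs[-1] on a nonempty list
lemma pvPyGetLast {α : Type} (xs : List α) (h : xs ≠ []) :
    PySem.List.pyGet? xs (-1) = some (xs.getLast h) := by
  rw [PySem.List.pyGet?_neg (xs := xs) (by norm_num) (by cases xs <;> simp_all)]
  simp only [show ((-(-1 : Int)).toNat) = 1 from rfl]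
  rw [← List.getLast?_eq_getElem?]
  exact List.getLast?_eq_some_getLast h

-- binary-search characterization: pvSeg finds the unique bracketing position
lemma pvSeg_eq (idxs : List Int) (hp : idxs.Pairwise (· < ·)) (i : Int) (k lo hi : Nat)
    (hlo : lo ≤ k) (hhi : k ≤ hi) (hlen : hi < idxs.length)
    (h1 : idxs[k]'(by omega) ≤ i)
    (h2 : ∀ m (hm : m < idxs.length), k < m → i < idxs[m]) :
    pvSeg idxs i lo hi = k := by
  have hmono := List.pairwise_iff_getElem.mp hp
  fun_induction pvSeg idxs i lo hi with
  | case1 lo hi hlt mid hle ih =>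
    have hmidlen : mid < idxs.length := by omega
    have hget : PySem.List.pyGetD idxs (mid : Int) 0 = idxs[mid] := by
      rw [PySem.List.pyGetD_natCast]
      simp [List.getD, List.getElem?_eq_getElem hmidlen]
    have hmk : mid ≤ k := by
      by_contra hc
      have := h2 mid hmidlen (by omega)
      rw [hget] at hle; omega
    exact ih (by omega) hhi hlen h1
  | case2 lo hi hlt mid hle ih =>
    have hmidlen : mid < idxs.length := by omega
    have hget : PySem.List.pyGetD idxs (mid : Int) 0 = idxs[mid] := by
      rw [PySem.List.pyGetD_natCast]
      simp [List.getD, List.getElem?_eq_getElem hmidlen]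
    rw [hget] at hle
    push Not at hle
    have hkm : k < mid := by
      by_contra hc
      push Not at hc
      have hgeq : idxs[mid] ≤ idxs[k]'(by omega) := by
        rcases Nat.eq_or_lt_of_le hc with he | hlt2
        · subst he; exact le_rfl
        · exact le_of_lt (hmono mid k hmidlen (by omega) hlt2)
      omega
    exact ih hlo (by omega) (by omega) h1
  | case3 lo hi hnlt => omega

-- B's loop body value on a bracketed index
lemma pvBval_bracket (items : List (Int × Int × Int))
    (hp : items.Pairwise (fun a b => a.1 < b.1)) (k : Nat) (i : Int)
    (hk : k + 1 < items.length)
    (h1 : (items[k]'(by omega)).1 ≤ i) (h2 : i < (items[k + 1]'(by omega)).1) :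
    pvBval items (items.map (fun p => p.1)) items.length i
      = pvVal (items[k]'(by omega)) (items[k + 1]'(by omega)) i := by
  have hpk : (items.map (fun p => p.1)).Pairwise (· < ·) := List.pairwise_map.mpr hp
  have hmono := List.pairwise_iff_getElem.mp hp
  have hlen : (items.map (fun p => p.1)).length = items.length := by simp
  have hseg : pvSeg (items.map (fun p => p.1)) i 0 (items.length - 1) = k := by
    apply pvSeg_eq _ hpk i k 0 _ (by omega) (by omega) (by omega)
    · simpa using h1
    · intro m hm hkm
      have hm' : m < items.length := by simpa using hm
      have : (items[k+1]'(by omega)).1 ≤ (items[m]'hm').1 := by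
        rcases Nat.eq_or_lt_of_le hkm with he | hlt2
        · subst he; exact le_rfl
        · exact le_of_lt (hmono (k+1) m (by omega) hm' hlt2)
      simp only [List.getElem_map]
      omega
  unfold pvBval
  simp only [hseg]
  have hg1 : PySem.List.pyGetD items ((k : Nat) : Int) (0, (0, 0)) = items[k]'(by omega) := by
    rw [PySem.List.pyGetD_natCast]
    simp [List.getD, List.getElem?_eq_getElem (by omega : k < items.length)]
  have hg2 : PySem.List.pyGetD items (((k : Nat) : Int) + 1) (0, (0, 0)) = items[k + 1]'(by omega) := by
    have : ((k : Nat) : Int) + 1 = ((k + 1 : Nat) : Int) := by push_cast; ring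
    rw [this, PySem.List.pyGetD_natCast]
    simp [List.getD, List.getElem?_eq_getElem (by omega : k + 1 < items.length)]
  rw [hg1, hg2]
  rfl

-- reindexing of a segment's range
lemma pvReindex {γ : Type} (F : Int → Int → γ) (a d : Int) :
    (PySem.List.pyRange 0 d 1).map (fun j => F (a + j) j)
      = (PySem.List.pyRange a (a + d) 1).map (fun i => F i (i - a)) := by
  rw [PySem.List.pyRange_one, PySem.List.pyRange_one]
  simp [List.map_map, Function.comp_def, add_sub_cancel_left]

-- enumerate with an unused index is the plain fold
lemma pvFoldl_enumerate_snd {α β : Type} (xs : List α) (s : Int) (g : β → α → β) (init : β) :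
    (PySem.List.enumerate xs s).foldl (fun acc p => g acc p.2) init = xs.foldl g init := by
  induction xs generalizing s init with
  | nil => simp [PySem.List.enumerate]
  | cons x t ih => rw [PySem.List.enumerate_cons]; simp only [List.foldl_cons]; exact ih _ _

-- A's nested insertion loop, flattened to an items list
lemma pvA_loop_items (l : List (Int × Int × Int)) (d : PySem.Dict Int (Int × Int))
    (hl : l.Pairwise (fun a b => a.1 < b.1))
    (hd : ∀ k ∈ d.keys, ∀ p ∈ l, k < p.1) :
    ((l.zip l.tail).foldl
        (fun acc pr =>
          (PySem.List.pyRange 0 (pr.2.1 - pr.1.1) 1).foldl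
            (fun acc2 j =>
              PySem.Dict.insert acc2 (pr.1.1 + j)
                (pvInterp pr.1.2.1 (pr.2.2.1 - pr.1.2.1) (pr.2.1 - pr.1.1) j,
                 pvInterp pr.1.2.2 (pr.2.2.2 - pr.1.2.2) (pr.2.1 - pr.1.1) j))
            acc)
        d).items = d.items ++ pvLA l := by
  induction l generalizing d with
  | nil => simp [pvLA]
  | cons p1 rest ih =>
    cases rest with
    | nil => simp [pvLA]
    | cons p2 r =>
      simp only [List.tail_cons, List.zip_cons_cons, List.foldl_cons]
      have hfresh : ∀ j ∈ PySem.List.pyRange 0 (p2.1 - p1.1) 1, d.contains (p1.1 + j) = false := by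
        intro j hj
        rw [PySem.List.mem_pyRange_one] at hj
        rcases Bool.eq_false_or_eq_true (d.contains (p1.1 + j)) with ht | hf
        · have := hd _ ((PySem.Dict.contains_iff_mem_keys _ _).mp ht) p1 (by simp)
          omega
        · exact hf
      have hnodup : ((PySem.List.pyRange 0 (p2.1 - p1.1) 1).map (fun j => p1.1 + j)).Nodup :=
        (PySem.List.nodup_pyRange_one _ _).map (fun a b h => by omega)
      have hinner := PySem.Dict.items_foldl_insert_fresh
        (PySem.List.pyRange 0 (p2.1 - p1.1) 1)
        (fun j => p1.1 + j)
        (fun j => (pvInterp p1.2.1 (p2.2.1 - p1.2.1) (p2.1 - p1.1) j,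
                   pvInterp p1.2.2 (p2.2.2 - p1.2.2) (p2.1 - p1.1) j))
        d hfresh hnodup
      set d' := (PySem.List.pyRange 0 (p2.1 - p1.1) 1).foldl
        (fun acc2 j =>
          PySem.Dict.insert acc2 (p1.1 + j)
            (pvInterp p1.2.1 (p2.2.1 - p1.2.1) (p2.1 - p1.1) j,
             pvInterp p1.2.2 (p2.2.2 - p1.2.2) (p2.1 - p1.1) j)) d with hd'
      have hd'items : d'.items = d.items ++ (PySem.List.pyRange 0 (p2.1 - p1.1) 1).map
          (fun j => (p1.1 + j, (pvInterp p1.2.1 (p2.2.1 - p1.2.1) (p2.1 - p1.1) j,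
                                pvInterp p1.2.2 (p2.2.2 - p1.2.2) (p2.1 - p1.1) j))) := hinner
      have hd'keys : ∀ k ∈ d'.keys, ∀ p ∈ p2 :: r, k < p.1 := by
        intro k hk p hp
        rw [PySem.Dict.keys, hd'items, List.map_append, List.mem_append] at hk
        rcases hk with hk | hk
        · have h1 := hd k (by rwa [PySem.Dict.keys]) p1 (by simp)
          have h2 : p1.1 < p.1 := (List.pairwise_cons.mp hl).1 p hp
          omega
        · simp only [List.map_map, List.mem_map, Function.comp_def] at hk
          obtain ⟨j, hj, rfl⟩ := hk
          rw [PySem.List.mem_pyRange_one] at hj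
          rcases List.mem_cons.mp hp with rfl | hp2
          · omega
          · have : p2.1 < p.1 := (List.pairwise_cons.mp hl.of_cons).1 p hp2
            omega
      have hih := ih d' hl.of_cons hd'keys
      simp only [List.tail_cons] at hih
      rw [hih, hd'items]
      have hLA : pvLA (p1 :: p2 :: r)
          = ((PySem.List.pyRange p1.1 p2.1 1).map (fun i => (i, pvVal p1 p2 i))) ++ pvLA (p2 :: r) := by
        simp [pvLA]
      rw [hLA, List.append_assoc]
      congr 2
      have := pvReindex (fun i j => (i, (pvInterp p1.2.1 (p2.2.1 - p1.2.1) (p2.1 - p1.1) j,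
                                         pvInterp p1.2.2 (p2.2.2 - p1.2.2) (p2.1 - p1.1) j))) p1.1 (p2.1 - p1.1)
      rw [show p1.1 + (p2.1 - p1.1) = p2.1 by ring] at this
      rw [this]
      rfl

-- a bracketing segment exists for any index below the last key
lemma pvExists_bracket (t : List Int) : ∀ (y0 : Int), ((y0 :: t).Pairwise (· < ·)) → ∀ i : Int, y0 ≤ i →
    i < (y0 :: t).getLast (by simp) →
    ∃ k, ∃ h : k + 1 < (y0 :: t).length, (y0 :: t)[k]'(by omega) ≤ i ∧ i < (y0 :: t)[k + 1]'(by omega) := by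
  induction t with
  | nil => intro y0 _ i h0 hlast; simp at hlast; omega
  | cons y1 t' ih =>
    intro y0 hp i h0 hlast
    by_cases hc : i < y1
    · exact ⟨0, by simp, by simpa using h0, by simpa using hc⟩
    · have hlast' : i < (y1 :: t').getLast (by simp) := by
        rwa [List.getLast_cons (by simp)] at hlast
      obtain ⟨k, hk, ha, hb⟩ := ih y1 hp.of_cons i (by omega) hlast'
      exact ⟨k + 1, by simpa using Nat.succ_lt_succ hk, by simpa using ha, by simpa using hb⟩

lemma pvHead_le_getLast (p : Int × Int × Int) (t : List (Int × Int × Int))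
    (hp : (p :: t).Pairwise (fun a b => a.1 < b.1)) : p.1 ≤ ((p :: t).getLast (by simp)).1 := by
  rcases List.mem_cons.mp (List.getLast_mem (show p :: t ≠ [] by simp)) with he | hm
  · rw [he]
  · exact le_of_lt ((List.pairwise_cons.mp hp).1 _ hm)

-- A's flat interior equals B's single pass over the full range
lemma pvLA_eq_range_map (t : List (Int × Int × Int)) : ∀ p0, ((p0 :: t).Pairwise (fun a b => a.1 < b.1)) →
    pvLA (p0 :: t)
      = (PySem.List.pyRange p0.1 (((p0 :: t).getLast (by simp)).1) 1).map
          (fun i => (i, pvBval (p0 :: t) ((p0 :: t).map (fun p => p.1)) (p0 :: t).length i)) := by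
  induction t with
  | nil =>
    intro p0 _
    simp [pvLA, PySem.List.pyRange_one_eq_nil (le_refl p0.1)]
  | cons p1 r ih =>
    intro p0 hp
    have hl01 : p0.1 < p1.1 := (List.pairwise_cons.mp hp).1 p1 (by simp)
    have hL : ((p0 :: p1 :: r).getLast (by simp)) = ((p1 :: r).getLast (by simp)) :=
      List.getLast_cons (by simp)
    have h1L : p1.1 ≤ ((p1 :: r).getLast (by simp)).1 := pvHead_le_getLast p1 r hp.of_cons
    rw [hL, PySem.List.pyRange_one_append p0.1 p1.1 _ (le_of_lt hl01) h1L, List.map_append]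
    have hLA : pvLA (p0 :: p1 :: r)
        = ((PySem.List.pyRange p0.1 p1.1 1).map (fun i => (i, pvVal p0 p1 i))) ++ pvLA (p1 :: r) := by
      simp [pvLA]
    rw [hLA, ih p1 hp.of_cons]
    congr 1
    · apply List.map_congr_left
      intro i hi
      rw [PySem.List.mem_pyRange_one] at hi
      have hb := pvBval_bracket (p0 :: p1 :: r) hp 0 i (by simp)
        (by simpa using hi.1) (by simpa using hi.2)
      rw [hb]
      simp
    · apply List.map_congr_left
      intro i hi
      rw [PySem.List.mem_pyRange_one] at hi
      have hpk : ((p1 :: r).map (fun p => p.1)).Pairwise (· < ·) :=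
        List.pairwise_map.mpr hp.of_cons
      have hgl : (p1.1 :: r.map (fun p => p.1)).getLast (by simp)
          = ((p1 :: r).getLast (by simp)).1 := by
        have h1 : (p1.1 :: r.map (fun p => p.1)).getLast? =
            some ((p1.1 :: r.map (fun p => p.1)).getLast (by simp)) :=
          List.getLast?_eq_some_getLast (by simp)
        have h2 : ((p1 :: r).map (fun p => p.1)).getLast? =
            ((p1 :: r).getLast?).map (fun p => p.1) := List.getLast?_map
        rw [List.getLast?_eq_some_getLast (by simp : (p1 :: r) ≠ [])] at h2
        have h3 := h1.symm.trans h2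
        simpa using h3
      obtain ⟨k, hk, ha, hb⟩ := pvExists_bracket (r.map (fun p => p.1)) p1.1
        (by exact hpk) i hi.1 (by rw [hgl]; exact hi.2)
      have hk2 : k + 1 < (p1 :: r).length := by simpa using hk
      have hk3 : k + 1 < r.length + 1 := by simpa using hk2
      have ha2 : (((p1 :: r).map (fun p => p.1))[k]'(by simp only [List.length_map, List.length_cons]; omega)) ≤ i := ha
      have hb2 : i < (((p1 :: r).map (fun p => p.1))[k + 1]'(by simp only [List.length_map, List.length_cons]; omega)) := hb
      simp only [List.getElem_map] at ha2 hb2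
      have hbB := pvBval_bracket (p1 :: r) hp.of_cons k i hk2 ha2 hb2
      have hbA := pvBval_bracket (p0 :: p1 :: r) hp (k + 1) i
        (by simp only [List.length_cons]; omega)
        (by simpa using ha2) (by simpa using hb2)
      rw [hbB, hbA]
      simp

-- ===== VERDICT (by name: the statement is the Claim_ definition above) =====
theorem interpolate_coordinates_spec : Claim_equal_interpolate_coordinates := by
  intro cd bs _hdom hpre
  unfold Spec_interpolate_coordinates
  obtain ⟨p0, t, hsc⟩ : ∃ p0 t, pvSortedItems cd = p0 :: t := by
    cases h : pvSortedItems cd with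
    | nil => exact absurd h (pvSortedItems_ne_nil cd hpre)
    | cons a b => exact ⟨a, b, rfl⟩
  have hp : (p0 :: t).Pairwise (fun a b => a.1 < b.1) := hsc ▸ pvSortedItems_pairwise cd
  have hL : PySem.List.pyGet? (p0 :: t) (-1) = some ((p0 :: t).getLast (by simp)) :=
    pvPyGetLast _ (by simp)
  have hB0 : PySem.List.pyGet? ((p0 :: t).map (fun p => p.1)) 0 = some p0.1 := by
    simp [PySem.List.pyGet?, PySem.List.pyIdx?]
  -- the two interior dictionaries coincide
  have h1 :
      ((PySem.List.enumerate ((p0 :: t).zip (PySem.List.slice (p0 :: t) (some 1) none)) 0).foldl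
        (fun acc ip =>
          (PySem.List.pyRange 0 (ip.2.2.1 - ip.2.1.1) 1).foldl
            (fun acc2 j =>
              PySem.Dict.insert acc2 (ip.2.1.1 + j)
                (pvInterp ip.2.1.2.1 (ip.2.2.2.1 - ip.2.1.2.1) (ip.2.2.1 - ip.2.1.1) j,
                 pvInterp ip.2.1.2.2 (ip.2.2.2.2 - ip.2.1.2.2) (ip.2.2.1 - ip.2.1.1) j))
            acc)
        PySem.Dict.empty)
      = ((PySem.List.pyRange p0.1 (((p0 :: t).getLast (by simp)).1) 1).foldl
          (fun acc i => PySem.Dict.insert acc i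
            (pvBval (p0 :: t) ((p0 :: t).map (fun p => p.1)) (p0 :: t).length i))
          PySem.Dict.empty) := by
    apply PySem.Dict.ext
    rw [PySem.List.slice_from (p0 :: t) (a := 1) (by norm_num)]
    simp only [show ((1 : Int).toNat) = 1 from rfl, List.drop_one]
    rw [pvFoldl_enumerate_snd ((p0 :: t).zip (p0 :: t).tail) 0
      (fun (acc : PySem.Dict Int (Int × Int)) (pr : (Int × Int × Int) × (Int × Int × Int)) =>
        (PySem.List.pyRange 0 (pr.2.1 - pr.1.1) 1).foldl
          (fun acc2 j =>
            PySem.Dict.insert acc2 (pr.1.1 + j)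
              (pvInterp pr.1.2.1 (pr.2.2.1 - pr.1.2.1) (pr.2.1 - pr.1.1) j,
               pvInterp pr.1.2.2 (pr.2.2.2 - pr.1.2.2) (pr.2.1 - pr.1.1) j))
          acc)
      PySem.Dict.empty]
    rw [pvA_loop_items (p0 :: t) PySem.Dict.empty hp
      (by intro k hk; rw [PySem.Dict.keys_empty] at hk; cases hk)]
    rw [pvLA_eq_range_map t p0 hp]
    rw [PySem.Dict.items_foldl_insert_fresh
      (PySem.List.pyRange p0.1 (((p0 :: t).getLast (by simp)).1) 1)
      (fun i => i)
      (fun i => pvBval (p0 :: t) ((p0 :: t).map (fun p => p.1)) (p0 :: t).length i)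
      PySem.Dict.empty
      (fun a _ => PySem.Dict.contains_empty a)
      (by simpa using PySem.List.nodup_pyRange_one _ _)]
  -- reduce both ports and conclude
  show interpolate_coordinates cd bs = interpolate_coordinates_alt cd bs
  unfold interpolate_coordinates interpolate_coordinates_alt
  rw [hsc]
  simp only [hL, hB0]
  exact congrArg (fun d => PySem.Dict.items
    ((PySem.List.pyRange (((p0 :: t).getLast (by simp)).1 + 1) bs 1).foldl
      (fun acc i => PySem.Dict.insert acc i ((p0 :: t).getLast (by simp)).2)
      (PySem.Dict.insert d ((p0 :: t).getLast (by simp)).1 ((p0 :: t).getLast (by simp)).2))) h1
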